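-- pv_equiv track=rewrite | github.com/SimoneNicosanti/Dissertation | src/Other/latency_scripts/delay_script.py | clean_input
-- ===== SOURCE A (Python) =====
-- def clean_input(input_list : list[str]) -> list[str] :
--     cleaned_input_list = []
--     for elem in input_list :
--         cleaned = elem.replace(" ", "")
--         cleaned = cleaned.replace("\n", "")
--         cleaned = cleaned.replace("(", "")
--         cleaned = cleaned.replace(")", "")
--
--         cleaned_input_list.append(cleaned)
--
--     return cleaned_input_list
-- ===== SOURCE B (Python) =====
-- def clean_input(input_list: list[str]) -> list[str]:
--     cleaned_input_list = []
--     for elem in input_list: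
--         kept = []
--         for ch in elem:
--             if ch not in ' \n()':
--                 kept.append(ch)
--         cleaned_input_list.append(''.join(kept))
--     return cleaned_input_list
-- ===== Notes on version B (the rewrite author's own statement) =====
-- stated objective: alternative
-- what changed: Replaces the four sequential str.replace scans per element with a single character-level pass that keeps only characters outside the deletion set {' ', '\n', '(', ')'}.
import Mathlib
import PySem

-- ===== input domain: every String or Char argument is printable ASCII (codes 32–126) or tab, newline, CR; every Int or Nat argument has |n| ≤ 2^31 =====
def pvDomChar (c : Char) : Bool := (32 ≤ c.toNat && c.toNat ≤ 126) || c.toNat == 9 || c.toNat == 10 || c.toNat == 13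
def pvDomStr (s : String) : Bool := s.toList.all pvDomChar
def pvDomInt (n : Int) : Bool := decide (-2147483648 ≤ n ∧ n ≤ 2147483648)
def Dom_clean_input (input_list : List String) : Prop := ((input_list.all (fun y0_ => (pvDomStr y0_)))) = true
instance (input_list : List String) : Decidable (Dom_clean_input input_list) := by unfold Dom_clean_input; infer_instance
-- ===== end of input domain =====

-- B replaces A's four sequential str.replace scans per element with one character-level pass keeping chars outside {' ', '\n', '(', ')'}; same result, different decomposition.

-- ===== PORT A =====
def clean_input (input_list : List String) : List String :=
  input_list.foldl
    (fun cleaned_input_list elem =>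
      let cleaned := PySem.Str.replace elem " " ""
      let cleaned := PySem.Str.replace cleaned "\n" ""
      let cleaned := PySem.Str.replace cleaned "(" ""
      let cleaned := PySem.Str.replace cleaned ")" ""
      cleaned_input_list ++ [cleaned])
    []

-- ===== PORT B =====
-- one inner loop over the characters, appending kept characters to an accumulator
def clean_input_alt (input_list : List String) : List String :=
  input_list.foldl
    (fun cleaned_input_list elem =>
      let kept := elem.toList.foldl
        (fun kept ch =>
          if ch = ' ' ∨ ch = '\n' ∨ ch = '(' ∨ ch = ')' then kept else kept ++ [ch])
        []
      cleaned_input_list ++ [String.ofList kept])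
    []

-- ===== PRECONDITION & SPEC =====
def Spec_clean_input (input_list : List String) (out : List String) : Prop := out = clean_input_alt input_list
instance (input_list : List String) (out : List String) : Decidable (Spec_clean_input input_list out) := by unfold Spec_clean_input; infer_instance

-- ===== CLAIM (what is proved, stated in full; the proofs are below) =====
def Claim_equal_clean_input : Prop := ∀ (input_list : List String), Dom_clean_input input_list → Spec_clean_input input_list (clean_input input_list)

-- ===== LEMMAS AND PROOFS =====

-- deleting a single character with replace(_, c, "") is filtering it out
theorem replace_go_single (c : Char) (fuel : Nat) (l acc : List Char)
    (h : l.length ≤ fuel) :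
    PySem.Chars.replace.go [c] [] fuel l acc
      = acc.reverse ++ l.filter (fun x => !(x == c)) := by
  induction fuel generalizing l acc with
  | zero =>
    have : l = [] := List.eq_nil_of_length_eq_zero (Nat.le_zero.mp h)
    subst this; simp [PySem.Chars.replace.go]
  | succ n ih =>
    cases l with
    | nil => simp [PySem.Chars.replace.go]
    | cons x t =>
      by_cases hx : x = c
      · subst hx
        have : [x].isPrefixOf (x :: t) = true := by simp [List.isPrefixOf]
        simp only [PySem.Chars.replace.go, this, if_pos]
        rw [ih _ _ (by simpa using Nat.le_of_succ_le_succ h)]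
        simp
      · have : [c].isPrefixOf (x :: t) = false := by
          simp [List.isPrefixOf]; exact fun hh => (hx hh.symm)
        simp only [PySem.Chars.replace.go, this, Bool.false_eq_true, if_neg, not_false_iff]
        rw [ih _ _ (by simpa using Nat.le_of_succ_le_succ h)]
        simp [hx]

theorem replace_single (c : Char) (s : List Char) :
    PySem.Chars.replace s [c] [] = s.filter (fun x => !(x == c)) := by
  unfold PySem.Chars.replace
  simp only [List.isEmpty_cons, Bool.false_eq_true, if_neg, not_false_iff]
  simpa using replace_go_single c s.length s []

-- B's inner loop is a filter
theorem keep_loop_eq_filter (l acc : List Char) :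
    l.foldl
      (fun kept ch =>
        if ch = ' ' ∨ ch = '\n' ∨ ch = '(' ∨ ch = ')' then kept else kept ++ [ch]) acc
      = acc ++ l.filter (fun ch => !(ch == ' ') && !(ch == '\n') && !(ch == '(') && !(ch == ')')) := by
  induction l generalizing acc with
  | nil => simp
  | cons x t ih =>
    by_cases hx : x = ' ' ∨ x = '\n' ∨ x = '(' ∨ x = ')'
    · have hb : (!(x == ' ') && !(x == '\n') && !(x == '(') && !(x == ')')) = false := by
        rcases hx with h | h | h | h <;> subst h <;> simp
      simp only [List.foldl_cons, if_pos hx, List.filter_cons, hb]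
      exact ih acc
    · push Not at hx
      have hb : (!(x == ' ') && !(x == '\n') && !(x == '(') && !(x == ')')) = true := by
        simp [hx.1, hx.2.1, hx.2.2.1, hx.2.2.2]
      simp only [List.foldl_cons, if_neg (by tauto : ¬(x = ' ' ∨ x = '\n' ∨ x = '(' ∨ x = ')')), List.filter_cons, hb]
      rw [ih]; simp

-- per-element agreement
theorem elem_eq (elem : String) :
    PySem.Str.replace (PySem.Str.replace (PySem.Str.replace (PySem.Str.replace elem " " "") "\n" "") "(" "") ")" ""
      = String.ofList (elem.toList.foldl
          (fun kept ch =>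
            if ch = ' ' ∨ ch = '\n' ∨ ch = '(' ∨ ch = ')' then kept else kept ++ [ch]) []) := by
  apply String.toList_injective
  rw [PySem.Str.toList_replace, PySem.Str.toList_replace, PySem.Str.toList_replace, PySem.Str.toList_replace]
  show PySem.Chars.replace (PySem.Chars.replace (PySem.Chars.replace (PySem.Chars.replace elem.toList [' '] []) ['\n'] []) ['('] []) [')'] [] = _
  rw [replace_single, replace_single, replace_single, replace_single, keep_loop_eq_filter]
  simp only [List.nil_append, String.toList_ofList, List.filter_filter]
  apply List.filter_congr
  intro x _
  cases hx1 : x == ' ' <;> cases hx2 : x == '\n' <;> cases hx3 : x == '(' <;> cases hx4 : x == ')' <;> simp_all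

-- the two foldl loops agree for every accumulator
theorem fold_agree (l : List String) (acc : List String) :
    l.foldl
      (fun cleaned_input_list elem =>
        let cleaned := PySem.Str.replace elem " " ""
        let cleaned := PySem.Str.replace cleaned "\n" ""
        let cleaned := PySem.Str.replace cleaned "(" ""
        let cleaned := PySem.Str.replace cleaned ")" ""
        cleaned_input_list ++ [cleaned]) acc
    = l.foldl
      (fun cleaned_input_list elem =>
        let kept := elem.toList.foldl
          (fun kept ch =>
            if ch = ' ' ∨ ch = '\n' ∨ ch = '(' ∨ ch = ')' then kept else kept ++ [ch])
          []
        cleaned_input_list ++ [String.ofList kept]) acc := by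
  induction l generalizing acc with
  | nil => simp only [List.foldl_nil]
  | cons x t ih =>
    simp only [List.foldl_cons]
    rw [ih, elem_eq x]

-- ===== VERDICT (by name: the statement is the Claim_ definition above) =====
theorem clean_input_spec : Claim_equal_clean_input := by
  intro input_list _
  show clean_input input_list = clean_input_alt input_list
  exact fold_agree input_list []
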